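-- pv_equiv track=rewrite | github.com/pypi-data/pypi-mirror-1 | packages/Jinja/Jinja-0.9-py2.4.egg/jinja/filters.py | do_truncate
-- ===== SOURCE A (Python) =====
-- def do_truncate(s, length=255, killwords=False, end='...'):
--     """
--     {{ s|truncate[ length[ killwords[ end]]] }}
--
--     Return a truncated copy of s. If killwords is True the filter
--     will cut the text at length and append end. Otherwise it will
--     try to save the last word and append end.
--     """
--     if len(s) <= length:
--         return s
--     if killwords:
--         return s[:length] + end
--     words = s.split(' ')
--     result = []
--     m = 0
--     for word in words:
--         m += len(word) + 1
--         if m > length: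
--             break
--         result.append(word)
--     return ' '.join(result)
-- ===== SOURCE B (Python) =====
-- def do_truncate(s, length=255, killwords=False, end='...'):
--     if len(s) <= length:
--         return s
--     if killwords:
--         return s[:length] + end
--     words = s.split(' ')
--     cum = []
--     total = 0
--     for w in words:
--         total += len(w) + 1
--         cum.append(total)
--     # binary search: number of leading words whose cumulative cost fits
--     lo, hi = 0, len(cum)
--     while lo < hi:
--         mid = (lo + hi) // 2
--         if cum[mid] <= length:
--             lo = mid + 1
--         else:
--             hi = mid
--     return ' '.join(words[:lo])
-- ===== Notes on version B (the rewrite author's own statement) =====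
-- stated objective: alternative
-- what changed: The word-preserving branch's append-until-break scan is replaced by a prefix-sum table of cumulative word costs plus a hand-written binary search (bisect_right) for the number k of words that fit, then the first k words are joined.
import Mathlib
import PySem

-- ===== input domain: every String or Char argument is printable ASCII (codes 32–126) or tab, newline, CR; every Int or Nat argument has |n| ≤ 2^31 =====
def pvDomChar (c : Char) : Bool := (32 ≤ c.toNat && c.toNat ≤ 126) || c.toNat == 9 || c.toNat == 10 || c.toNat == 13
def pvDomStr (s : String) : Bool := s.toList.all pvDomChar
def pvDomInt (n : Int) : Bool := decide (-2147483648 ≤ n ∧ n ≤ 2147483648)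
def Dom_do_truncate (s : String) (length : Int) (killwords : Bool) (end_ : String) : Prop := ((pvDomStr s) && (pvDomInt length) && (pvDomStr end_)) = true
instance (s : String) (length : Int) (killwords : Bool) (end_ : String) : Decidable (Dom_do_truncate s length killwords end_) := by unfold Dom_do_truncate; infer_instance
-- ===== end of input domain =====

-- B replaces the append-until-break word scan by a prefix-sum table of word costs plus a
-- binary search for the number of words that fit (alternative decomposition, same asymptotic cost).
-- ===== PORT A =====
-- s.split(' '): sep is nonempty, so split? is always some; getD [] never fires (exact)
def pvWords (s : String) : List String := (PySem.Str.split? s " ").getD []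

-- the for-loop over words with 'break': result accumulator and running cost m
def pvTruncLoopA (length : Int) : List String → Int → List String → List String
  | [], _, result => result
  | w :: ws, m, result =>
    if m + PySem.Str.len w + 1 > length then result
    else pvTruncLoopA length ws (m + PySem.Str.len w + 1) (result ++ [w])

def do_truncate (s : String) (length : Int) (killwords : Bool) (end_ : String) : String :=
  if PySem.Str.len s ≤ length then s
  else if killwords then PySem.Str.slice s none (some length) ++ end_
  else PySem.Str.join " " (pvTruncLoopA length (pvWords s) 0 [])

-- ===== PORT B =====
-- Source B's prefix-sum building loop: cum accumulator and running total
def pvCumLoopB : List String → Int → List Int → List Int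
  | [], _, cum => cum
  | w :: ws, total, cum => pvCumLoopB ws (total + PySem.Str.len w + 1) (cum ++ [total + PySem.Str.len w + 1])

-- Source B's while-loop binary search; cum[mid] via getD: mid is always in range (lo ≤ mid < hi ≤ len cum), exact
def pvBsearchB (cum : List Int) (length : Int) (lo hi : Nat) : Nat :=
  if lo < hi then
    if cum.getD ((lo + hi) / 2) 0 ≤ length then pvBsearchB cum length ((lo + hi) / 2 + 1) hi
    else pvBsearchB cum length lo ((lo + hi) / 2)
  else lo
termination_by hi - lo
decreasing_by all_goals omega

def do_truncate_alt (s : String) (length : Int) (killwords : Bool) (end_ : String) : String :=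
  if PySem.Str.len s ≤ length then s
  else if killwords then PySem.Str.slice s none (some length) ++ end_
  else
    let words := pvWords s
    let cum := pvCumLoopB words 0 []
    -- words[:lo] with lo : Nat is exactly List.take lo
    PySem.Str.join " " (words.take (pvBsearchB cum length 0 cum.length))

-- ===== PRECONDITION & SPEC =====
def Spec_do_truncate (s : String) (length : Int) (killwords : Bool) (end_ : String) (out : String) : Prop := out = do_truncate_alt s length killwords end_
instance (s : String) (length : Int) (killwords : Bool) (end_ : String) (out : String) : Decidable (Spec_do_truncate s length killwords end_ out) := by unfold Spec_do_truncate; infer_instance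

-- ===== CLAIM (what is proved, stated in full; the proofs are below) =====
def Claim_equal_do_truncate : Prop := ∀ (s : String) (length : Int) (killwords : Bool) (end_ : String), Dom_do_truncate s length killwords end_ → Spec_do_truncate s length killwords end_ (do_truncate s length killwords end_)

-- ===== LEMMAS AND PROOFS =====

-- first-break count of A's loop: how many leading words it appends starting from cost m
def pvCount (length : Int) : List String → Int → Nat
  | [], _ => 0
  | w :: ws, m =>
    if m + (w.length : Int) + 1 > length then 0
    else pvCount length ws (m + (w.length : Int) + 1) + 1

-- the cumulative-cost sequence B builds, starting from total m
def pvCseq : List String → Int → List Int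
  | [], _ => []
  | w :: ws, m => (m + (w.length : Int) + 1) :: pvCseq ws (m + (w.length : Int) + 1)

lemma pvTruncLoopA_eq (length : Int) : ∀ (ws : List String) (m : Int) (result : List String),
    pvTruncLoopA length ws m result = result ++ ws.take (pvCount length ws m) := by
  intro ws
  induction ws with
  | nil => intro m result; simp [pvTruncLoopA, pvCount]
  | cons w ws ih =>
    intro m result
    simp only [pvTruncLoopA, pvCount, PySem.Str.len_eq, String.length_toList]
    by_cases h : m + (w.length : Int) + 1 > length
    · rw [if_pos h, if_pos h, List.take_zero, List.append_nil]
    · rw [if_neg h, if_neg h, ih, List.take_succ_cons, List.append_assoc, List.singleton_append]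

lemma pvCumLoopB_eq : ∀ (ws : List String) (total : Int) (cum : List Int),
    pvCumLoopB ws total cum = cum ++ pvCseq ws total := by
  intro ws
  induction ws with
  | nil => intro total cum; simp [pvCumLoopB, pvCseq]
  | cons w ws ih => intro total cum; simp [pvCumLoopB, pvCseq, ih]

lemma pvCseq_length : ∀ (ws : List String) (m : Int), (pvCseq ws m).length = ws.length := by
  intro ws
  induction ws with
  | nil => intro m; simp [pvCseq]
  | cons w ws ih => intro m; simp [pvCseq, ih]

lemma pvCount_le : ∀ (ws : List String) (length m : Int), pvCount length ws m ≤ ws.length := by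
  intro ws
  induction ws with
  | nil => intro length m; simp [pvCount]
  | cons w ws ih =>
    intro length m
    simp only [pvCount, List.length_cons]
    split
    · omega
    · exact Nat.succ_le_succ (ih _ _)

lemma pvCount_of_gt : ∀ (ws : List String) (length m : Int), length < m →
    pvCount length ws m = 0 := by
  intro ws
  cases ws with
  | nil => intro length m _; simp [pvCount]
  | cons w ws =>
    intro length m h
    simp only [pvCount]
    rw [if_pos (by omega)]

-- characterisation: the i-th cumulative cost fits iff i is below A's break count
lemma pvChar : ∀ (ws : List String) (length m : Int) (i : Nat), i < ws.length →
    ((pvCseq ws m).getD i 0 ≤ length ↔ i < pvCount length ws m) := by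
  intro ws
  induction ws with
  | nil => intro length m i h; simp at h
  | cons w ws ih =>
    intro length m i h
    simp only [pvCseq, pvCount]
    cases i with
    | zero =>
      rw [List.getD_cons_zero]
      by_cases hc : m + (w.length : Int) + 1 > length
      · rw [if_pos hc]; omega
      · rw [if_neg hc]; omega
    | succ j =>
      rw [List.getD_cons_succ]
      have hj : j < ws.length := by simpa using h
      by_cases hc : m + (w.length : Int) + 1 > length
      · rw [if_pos hc]
        have h0 := pvCount_of_gt ws length (m + (w.length : Int) + 1) (by omega)
        rw [ih length (m + (w.length : Int) + 1) j hj, h0]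
        omega
      · rw [if_neg hc, ih length (m + (w.length : Int) + 1) j hj]
        omega

lemma pvBsearchB_eq (cum : List Int) (length : Int) (k : Nat)
    (hchar : ∀ i, i < cum.length → (cum.getD i 0 ≤ length ↔ i < k)) :
    ∀ (n lo hi : Nat), hi - lo ≤ n → lo ≤ k → k ≤ hi → hi ≤ cum.length →
    pvBsearchB cum length lo hi = k := by
  intro n
  induction n with
  | zero =>
    intro lo hi hn hlo hhi hle
    rw [pvBsearchB, if_neg (by omega)]
    omega
  | succ n ih =>
    intro lo hi hn hlo hhi hle
    by_cases h : lo < hi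
    · rw [pvBsearchB, if_pos h]
      have hmlen : (lo + hi) / 2 < cum.length := by omega
      by_cases hc : cum.getD ((lo + hi) / 2) 0 ≤ length
      · rw [if_pos hc]
        have : (lo + hi) / 2 < k := (hchar _ hmlen).mp hc
        exact ih ((lo + hi) / 2 + 1) hi (by omega) (by omega) hhi hle
      · rw [if_neg hc]
        have : ¬ ((lo + hi) / 2 < k) := fun hk => hc ((hchar _ hmlen).mpr hk)
        exact ih lo ((lo + hi) / 2) (by omega) hlo (by omega) (by omega)
    · rw [pvBsearchB, if_neg h]
      omega

-- ===== VERDICT (by name: the statement is the Claim_ definition above) =====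
theorem do_truncate_spec : Claim_equal_do_truncate := by
  intro s length killwords end_ _
  unfold Spec_do_truncate do_truncate do_truncate_alt
  by_cases h1 : PySem.Str.len s ≤ length
  · rw [if_pos h1, if_pos h1]
  · rw [if_neg h1, if_neg h1]
    cases killwords
    · simp only [Bool.false_eq_true, if_false]
      rw [pvTruncLoopA_eq, pvCumLoopB_eq]
      simp only [List.nil_append]
      have hb : pvBsearchB (pvCseq (pvWords s) 0) length 0 (pvCseq (pvWords s) 0).length
          = pvCount length (pvWords s) 0 := by
        refine pvBsearchB_eq (pvCseq (pvWords s) 0) length (pvCount length (pvWords s) 0)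
          (fun i hi => pvChar (pvWords s) length 0 i (by rwa [pvCseq_length] at hi))
          (pvCseq (pvWords s) 0).length 0 (pvCseq (pvWords s) 0).length (by omega) (by omega) ?_ (by omega)
        rw [pvCseq_length]
        exact pvCount_le (pvWords s) length 0
      rw [hb]
    · rfl
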